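-- pv_equiv track=rewrite | github.com/ElieLP/detectiveindefective | src/extraction.py | categorize_fqc
-- ===== SOURCE A (Python) =====
-- def categorize_fqc(text: str) -> str:
--     """Categorize QA comments."""
--     text = str(text).lower().strip()
--     if text in ['nan', 'none', '', '/']:
--         return 'Undefined'
--     elif any(word in text for word in ['awaiting', 'waiting', 'investigation']):
--         return 'Pending Decision'
--     elif any(word in text for word in ['continue', 'accept', 'approved', 'verbal']):
--         return 'Decision: Proceed/Accept'
--     elif any(word in text for word in ['re-measurement', 'recheck', 'retest', 'fctd', 'attachment']):
--         return 'Measurement/Verification'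
--     elif any(word in text for word in ['confirmed', 'reply', 'decided', 'rework']):
--         return 'QA Replied/Action Taken'
--     else:
--         return 'Other/General'
-- ===== SOURCE B (Python) =====
-- KEYWORD_PRIORITY = {
--     'awaiting': 0, 'waiting': 0, 'investigation': 0,
--     'continue': 1, 'accept': 1, 'approved': 1, 'verbal': 1,
--     're-measurement': 2, 'recheck': 2, 'retest': 2, 'fctd': 2, 'attachment': 2,
--     'confirmed': 3, 'reply': 3, 'decided': 3, 'rework': 3,
-- }
-- LABELS = ['Pending Decision', 'Decision: Proceed/Accept',
--           'Measurement/Verification', 'QA Replied/Action Taken', 'Other/General']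
--
--
-- def categorize_fqc(text: str) -> str:
--     """Categorize QA comments: best (lowest) priority over all matching keywords."""
--     text = str(text).lower().strip()
--     if text in ('nan', 'none', '', '/'):
--         return 'Undefined'
--     best = min((p for kw, p in KEYWORD_PRIORITY.items() if kw in text), default=4)
--     return LABELS[best]
-- ===== Notes on version B (the rewrite author's own statement) =====
-- stated objective: alternative
-- what changed: Instead of A's short-circuit if/elif chain of per-category keyword scans, B makes one pass over a flat keyword-to-priority map taking the minimum priority among all matching keywords and indexes a label list with it (the exact 'Undefined' guard stays separate).
import Mathlib
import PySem

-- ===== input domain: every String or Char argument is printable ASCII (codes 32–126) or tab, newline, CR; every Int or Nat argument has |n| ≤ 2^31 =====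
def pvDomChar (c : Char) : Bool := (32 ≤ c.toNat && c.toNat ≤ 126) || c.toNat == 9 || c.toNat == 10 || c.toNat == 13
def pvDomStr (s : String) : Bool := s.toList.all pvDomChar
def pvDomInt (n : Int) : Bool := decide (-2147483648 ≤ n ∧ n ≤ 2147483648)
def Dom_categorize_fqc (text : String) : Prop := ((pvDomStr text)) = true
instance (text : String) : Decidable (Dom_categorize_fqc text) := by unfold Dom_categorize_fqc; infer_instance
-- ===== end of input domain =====

-- B replaces A's short-circuit if/elif chain by one pass over a flat keyword→priority
-- table computing the minimum matching priority, then indexing a label list (alternative; same cost).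

-- ===== PORT A =====
def categorize_fqc (text : String) : String :=
  let t := PySem.Str.strip (PySem.Str.lower text)
  if t = "nan" ∨ t = "none" ∨ t = "" ∨ t = "/" then "Undefined"
  else if ["awaiting", "waiting", "investigation"].any (fun w => PySem.Str.isIn w t) then
    "Pending Decision"
  else if ["continue", "accept", "approved", "verbal"].any (fun w => PySem.Str.isIn w t) then
    "Decision: Proceed/Accept"
  else if ["re-measurement", "recheck", "retest", "fctd", "attachment"].any (fun w => PySem.Str.isIn w t) then
    "Measurement/Verification"
  else if ["confirmed", "reply", "decided", "rework"].any (fun w => PySem.Str.isIn w t) then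
    "QA Replied/Action Taken"
  else "Other/General"

-- ===== PORT B =====
def fqcKeywordPriority : List (String × Nat) :=
  [("awaiting", 0), ("waiting", 0), ("investigation", 0),
   ("continue", 1), ("accept", 1), ("approved", 1), ("verbal", 1),
   ("re-measurement", 2), ("recheck", 2), ("retest", 2), ("fctd", 2), ("attachment", 2),
   ("confirmed", 3), ("reply", 3), ("decided", 3), ("rework", 3)]

def fqcLabels : List String :=
  ["Pending Decision", "Decision: Proceed/Accept",
   "Measurement/Verification", "QA Replied/Action Taken", "Other/General"]

def categorize_fqc_alt (text : String) : String :=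
  let t := PySem.Str.strip (PySem.Str.lower text)
  if t = "nan" ∨ t = "none" ∨ t = "" ∨ t = "/" then "Undefined"
  else
    -- min over matching priorities, default 4 (Python's min(…, default=4) as a fold)
    let best := fqcKeywordPriority.foldl
      (fun acc kp => if PySem.Str.isIn kp.1 t then min acc kp.2 else acc) 4
    fqcLabels.getD best ""

-- ===== PRECONDITION & SPEC =====
def Spec_categorize_fqc (text : String) (out : String) : Prop := out = categorize_fqc_alt text
instance (text : String) (out : String) : Decidable (Spec_categorize_fqc text out) := by unfold Spec_categorize_fqc; infer_instance

-- ===== CLAIM (what is proved, stated in full; the proofs are below) =====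
def Claim_equal_categorize_fqc : Prop := ∀ (text : String), Dom_categorize_fqc text → Spec_categorize_fqc text (categorize_fqc text)

-- ===== LEMMAS AND PROOFS =====

-- folding one constant-priority keyword group into the running minimum
theorem fqc_fold_group (t : String) (p : Nat) : ∀ (ws : List String) (acc : Nat),
    (ws.map (fun w => (w, p))).foldl
        (fun acc kp => if PySem.Str.isIn kp.1 t then min acc kp.2 else acc) acc
      = if ws.any (fun w => PySem.Str.isIn w t) then min acc p else acc := by
  intro ws
  induction ws with
  | nil => intro acc; simp only [List.map, List.foldl, List.any]; rfl
  | cons w ws ih =>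
    intro acc
    simp only [List.map, List.foldl, List.any_cons]
    rw [ih]
    by_cases h : PySem.Str.isIn w t = true <;>
      by_cases h2 : ws.any (fun w => PySem.Str.isIn w t) = true <;>
        simp only [h, h2, Bool.true_or, Bool.false_or, Bool.not_eq_true] at * <;>
        simp only [Bool.false_eq_true, reduceIte] <;> omega

-- the flat table is the concatenation of the four constant-priority groups
theorem fqc_table_eq :
    fqcKeywordPriority =
      (["awaiting", "waiting", "investigation"].map (fun w => (w, 0)))
      ++ (["continue", "accept", "approved", "verbal"].map (fun w => (w, 1)))
      ++ (["re-measurement", "recheck", "retest", "fctd", "attachment"].map (fun w => (w, 2)))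
      ++ (["confirmed", "reply", "decided", "rework"].map (fun w => (w, 3))) := by
  rfl

-- ===== VERDICT (by name: the statement is the Claim_ definition above) =====
theorem categorize_fqc_spec : Claim_equal_categorize_fqc := by
  intro text _
  unfold Spec_categorize_fqc categorize_fqc categorize_fqc_alt
  set t := PySem.Str.strip (PySem.Str.lower text) with ht
  by_cases hu : t = "nan" ∨ t = "none" ∨ t = "" ∨ t = "/"
  · simp only [hu, if_true]
  · simp only [hu, if_false]
    rw [fqc_table_eq]
    simp only [List.foldl_append, fqc_fold_group]
    generalize (["awaiting", "waiting", "investigation"].any (fun w => PySem.Str.isIn w t)) = b0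
    generalize (["continue", "accept", "approved", "verbal"].any (fun w => PySem.Str.isIn w t)) = b1
    generalize (["re-measurement", "recheck", "retest", "fctd", "attachment"].any (fun w => PySem.Str.isIn w t)) = b2
    generalize (["confirmed", "reply", "decided", "rework"].any (fun w => PySem.Str.isIn w t)) = b3
    cases b0 <;> cases b1 <;> cases b2 <;> cases b3 <;> rfl
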